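-- pv_equiv track=rewrite | github.com/zartwilly/MS_enr_v1 | insertPV_bus_ts.py | build_list_of_prefixes
-- ===== SOURCE A (Python) =====
-- def build_list_of_prefixes(data, bool_sort=True):
--     """
--     data : liste de tuples (x0, x1, x2, x3), (x10, x11, x12, x13), ...
--     retourne : [[(x0, x1, x2, x3),], [(x0, x1, x2, x3), (x10, x11, x12, x13)], ...]
--     """
--
--     sorted_data = None
--     if bool_sort:
--         # 1) trier par le 5e élément (indice 4) décroissant
--         sorted_data = sorted(data, key=lambda t: t[4], reverse=True)
--         # sorted_data vaut :
--         # [(600...,5), (606...,4), (674...,2), (507...,1), (555...,0)]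
--     else:
--         # deja trier par le 4-th item of tuple data
--         sorted_data = data
--
--     # 2) construire les préfixes
--     result = []
--     for i in range(1, len(sorted_data) + 1):
--         result.append(sorted_data[:i])
--     return result
-- ===== SOURCE B (Python) =====
-- def build_list_of_prefixes(data, bool_sort=True):
--     seq = sorted(data, key=lambda t: t[4], reverse=True) if bool_sort else data
--     result = []
--     prefix = []
--     for t in seq:
--         prefix = prefix + [t]
--         result.append(prefix)
--     return result
-- ===== Notes on version B (the rewrite author's own statement) =====
-- stated objective: alternative
-- what changed: Instead of re-slicing the sorted list from index 0 for every i, B maintains a running prefix list and extends it by one element per iteration, appending a fresh copy each step; trades repeated slicing for incremental accumulation.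
import Mathlib
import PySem

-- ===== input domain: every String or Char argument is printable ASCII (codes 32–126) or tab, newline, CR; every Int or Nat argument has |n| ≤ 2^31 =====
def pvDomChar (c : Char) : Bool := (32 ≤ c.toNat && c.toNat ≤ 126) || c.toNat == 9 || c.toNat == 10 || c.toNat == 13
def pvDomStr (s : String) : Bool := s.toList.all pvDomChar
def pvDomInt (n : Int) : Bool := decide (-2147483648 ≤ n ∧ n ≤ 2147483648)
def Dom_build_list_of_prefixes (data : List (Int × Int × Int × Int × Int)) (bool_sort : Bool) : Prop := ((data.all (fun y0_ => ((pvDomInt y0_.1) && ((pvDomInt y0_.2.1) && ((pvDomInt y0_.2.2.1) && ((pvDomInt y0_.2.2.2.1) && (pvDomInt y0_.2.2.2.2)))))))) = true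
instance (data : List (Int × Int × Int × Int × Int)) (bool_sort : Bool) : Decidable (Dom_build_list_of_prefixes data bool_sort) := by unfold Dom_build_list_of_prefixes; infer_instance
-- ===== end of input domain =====

-- B builds each prefix incrementally from the previous one instead of re-slicing; alternative decomposition, no speed claim.

-- ===== PORT A =====
def build_list_of_prefixes (data : List (Int × Int × Int × Int × Int)) (bool_sort : Bool) : List (List (Int × Int × Int × Int × Int)) :=
  let sorted_data := if bool_sort then PySem.List.sorted data (fun t => t.2.2.2.2) true else data
  (PySem.List.pyRange 1 ((sorted_data.length : Int) + 1) 1).foldl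
    (fun result i => result ++ [PySem.List.slice sorted_data none (some i)]) []

-- ===== PORT B =====
def build_list_of_prefixes_alt (data : List (Int × Int × Int × Int × Int)) (bool_sort : Bool) : List (List (Int × Int × Int × Int × Int)) :=
  let seq := if bool_sort then PySem.List.sorted data (fun t => t.2.2.2.2) true else data
  (seq.foldl
    (fun (st : List (Int × Int × Int × Int × Int) × List (List (Int × Int × Int × Int × Int))) t =>
      let pfx := st.1 ++ [t]
      (pfx, st.2 ++ [pfx])) ([], [])).2

-- ===== PRECONDITION & SPEC =====
def Spec_build_list_of_prefixes (data : List (Int × Int × Int × Int × Int)) (bool_sort : Bool) (out : List (List (Int × Int × Int × Int × Int))) : Prop := out = build_list_of_prefixes_alt data bool_sort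
instance (data : List (Int × Int × Int × Int × Int)) (bool_sort : Bool) (out : List (List (Int × Int × Int × Int × Int))) : Decidable (Spec_build_list_of_prefixes data bool_sort out) := by unfold Spec_build_list_of_prefixes; infer_instance

-- ===== CLAIM (what is proved, stated in full; the proofs are below) =====
def Claim_equal_build_list_of_prefixes : Prop := ∀ (data : List (Int × Int × Int × Int × Int)) (bool_sort : Bool), Dom_build_list_of_prefixes data bool_sort → Spec_build_list_of_prefixes data bool_sort (build_list_of_prefixes data bool_sort)

-- ===== LEMMAS AND PROOFS =====

-- a foldl that only appends singletons is a map
theorem pvFoldlAppendMap {α β : Type} (g : α → β) :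
    ∀ (l : List α) (acc : List β), l.foldl (fun r i => r ++ [g i]) acc = acc ++ l.map g := by
  intro l
  induction l with
  | nil => simp
  | cons x xs ih => intro acc; simp [List.foldl, ih]

-- B's fold characterised: snd collects acc ++ all prefixes of xs, each prepended by p
theorem pvFoldB {α : Type} :
    ∀ (xs : List α) (p : List α) (acc : List (List α)),
      (xs.foldl (fun (st : List α × List (List α)) t =>
        let pfx := st.1 ++ [t]
        (pfx, st.2 ++ [pfx])) (p, acc)).2
      = acc ++ (List.range xs.length).map (fun i => p ++ xs.take (i + 1)) := by
  intro xs
  induction xs with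
  | nil => simp
  | cons x rest ih =>
      intro p acc
      simp only [List.foldl, List.length_cons]
      rw [ih]
      rw [List.range_succ_eq_map]
      simp [List.map_map, Function.comp, List.append_assoc]

-- the common core: A's slicing fold = B's accumulating fold, for any sequence
theorem pvCore {α : Type} (xs : List α) :
    (PySem.List.pyRange 1 ((xs.length : Int) + 1) 1).foldl
      (fun result i => result ++ [PySem.List.slice xs none (some i)]) []
    = (xs.foldl
        (fun (st : List α × List (List α)) t =>
          let pfx := st.1 ++ [t]
          (pfx, st.2 ++ [pfx])) ([], [])).2 := by
  rw [pvFoldB xs [] [], pvFoldlAppendMap]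
  rw [PySem.List.pyRange_one]
  have h : ((xs.length : Int) + 1 - 1).toNat = xs.length := by omega
  rw [h, List.map_map]
  apply List.map_congr_left
  intro k hk
  simp only [Function.comp]
  have : (1 : Int) + (k : Int) = ((k + 1 : Nat) : Int) := by push_cast; ring
  rw [this, PySem.List.slice_to_natCast]
  simp

-- ===== VERDICT (by name: the statement is the Claim_ definition above) =====
theorem build_list_of_prefixes_spec : Claim_equal_build_list_of_prefixes := by
  intro data bool_sort _
  unfold Spec_build_list_of_prefixes build_list_of_prefixes build_list_of_prefixes_alt
  cases bool_sort <;> simp only [if_true, if_false, Bool.false_eq_true] <;>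
    exact pvCore _
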